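-- pv_equiv track=rewrite | github.com/BOINC/boinc | deploy/cleanup_vcpkg_archive_cache.py | read_control
-- ===== SOURCE A (Python) =====
-- def read_control(control):
--     package = ''
--     version = '0'
--     port_version = '0'
--     architecture = ''
--     lines = control.split('\n')
--     for line in lines:
--         if (line != ''):
--             pair = line.split(': ')
--             if (pair[0] == 'Package'):
--                 package = pair[1]
--             elif (pair[0] == 'Version'):
--                 version = pair[1]
--             elif (pair[0] == 'Port-Version'):
--                 port_version = pair[1]
--             elif (pair[0] == 'Architecture'):
--                 architecture = pair[1]
--     return package, version + '-' + port_version, architecture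
-- ===== SOURCE B (Python) =====
-- def read_control(control):
--     lines = control.split('\n')
--
--     def last_value(key, default):
--         # scan back-to-front; the first match seen is the last occurrence
--         for line in reversed(lines):
--             if line != '':
--                 pair = line.split(': ')
--                 if pair[0] == key:
--                     return pair[1]
--         return default
--
--     return (last_value('Package', ''),
--             last_value('Version', '0') + '-' + last_value('Port-Version', '0'),
--             last_value('Architecture', ''))
-- ===== Notes on version B (the rewrite author's own statement) =====
-- stated objective: alternative
-- what changed: Replaces A's single forward pass with four state variables and an if/elif chain by four independent backward scans, each returning early at the last occurrence of its own field (correct because in A the last assignment to each variable wins).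
import Mathlib
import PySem

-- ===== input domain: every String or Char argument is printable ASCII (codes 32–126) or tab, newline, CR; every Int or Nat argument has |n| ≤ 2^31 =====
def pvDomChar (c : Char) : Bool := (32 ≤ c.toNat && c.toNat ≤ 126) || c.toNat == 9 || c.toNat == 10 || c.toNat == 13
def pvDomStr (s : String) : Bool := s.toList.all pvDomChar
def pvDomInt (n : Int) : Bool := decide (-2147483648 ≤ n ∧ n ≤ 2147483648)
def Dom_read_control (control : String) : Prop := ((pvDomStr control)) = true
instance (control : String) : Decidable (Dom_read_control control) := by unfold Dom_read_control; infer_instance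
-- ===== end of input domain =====

-- B replaces A's single forward pass with four accumulators by four independent backward scans,
-- each returning early at the last occurrence of its field (objective: alternative decomposition).


-- ===== PORT A =====
-- str.split(sep) with a nonempty literal sep: PySem.Str.split? is some there, so .getD [] is exact
def pySplit (s sep : String) : List String := (PySem.Str.split? s sep).getD []

-- A's loop body: the if/elif chain over the four accumulator variables
-- (pair[1] via pyGetD: Pre_ excludes the inputs where Python raises IndexError there)
def stepA (st : String × String × String × String) (line : String) :
    String × String × String × String :=
  let (package, version, port_version, architecture) := st
  if line ≠ "" then
    let pair := pySplit line ": "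
    if PySem.List.pyGetD pair 0 "" = "Package" then
      (PySem.List.pyGetD pair 1 "", version, port_version, architecture)
    else if PySem.List.pyGetD pair 0 "" = "Version" then
      (package, PySem.List.pyGetD pair 1 "", port_version, architecture)
    else if PySem.List.pyGetD pair 0 "" = "Port-Version" then
      (package, version, PySem.List.pyGetD pair 1 "", architecture)
    else if PySem.List.pyGetD pair 0 "" = "Architecture" then
      (package, version, port_version, PySem.List.pyGetD pair 1 "")
    else st
  else st

def read_control (control : String) : String × String × String :=
  let lines := pySplit control "\n"
  let st := lines.foldl stepA ("", "0", "0", "")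
  (st.1, st.2.1 ++ "-" ++ st.2.2.1, st.2.2.2)

-- ===== PORT B =====
def pair0 (l : String) : String := PySem.List.pyGetD (pySplit l ": ") 0 ""
def pair1 (l : String) : String := PySem.List.pyGetD (pySplit l ": ") 1 ""

-- B's per-field backward scan with early return (argument list is already reversed)
def lastValue : List String → String → String → String
  | [], _, d => d
  | l :: rest, key, d =>
    if l ≠ "" ∧ pair0 l = key then pair1 l else lastValue rest key d

def read_control_alt (control : String) : String × String × String :=
  let rev := (pySplit control "\n").reverse
  (lastValue rev "Package" "",
   lastValue rev "Version" "0" ++ "-" ++ lastValue rev "Port-Version" "0",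
   lastValue rev "Architecture" "")

-- ===== PRECONDITION & SPEC =====
def pvKeys : List String := ["Package", "Version", "Port-Version", "Architecture"]

-- Pre_ excludes exactly the inputs on which Python A raises IndexError: a line whose whole
-- text equals a recognized key (then split finds no ': ' and pair[1] is out of range).
def Pre_read_control (control : String) : Prop :=
  ∀ line ∈ pySplit control "\n", line ∉ pvKeys
instance (control : String) : Decidable (Pre_read_control control) := by
  unfold Pre_read_control; infer_instance
def pvWitness_read_control : String := "Package: boinc\nVersion: 7.24\nPort-Version: 2\nArchitecture: x64\n\nFoo"
def Spec_read_control (control : String) (out : String × String × String) : Prop := out = read_control_alt control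
instance (control : String) (out : String × String × String) : Decidable (Spec_read_control control out) := by unfold Spec_read_control; infer_instance

-- ===== CLAIM (what is proved, stated in full; the proofs are below) =====
def Claim_equal_read_control : Prop := ∀ (control : String), Dom_read_control control → Pre_read_control control → Spec_read_control control (read_control control)

-- ===== LEMMAS AND PROOFS =====

theorem lastValue_append (xs ys : List String) (key d : String) :
    lastValue (xs ++ ys) key d = lastValue xs key (lastValue ys key d) := by
  induction xs with
  | nil => rfl
  | cons l rest ih => by_cases h : l ≠ "" ∧ pair0 l = key <;> simp [lastValue, h, ih]

-- each of A's four accumulators changes exactly when its own key matches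
theorem stepA_fields (st : String × String × String × String) (l : String) :
    (stepA st l).1 = (if l ≠ "" ∧ pair0 l = "Package" then pair1 l else st.1) ∧
    (stepA st l).2.1 = (if l ≠ "" ∧ pair0 l = "Version" then pair1 l else st.2.1) ∧
    (stepA st l).2.2.1 = (if l ≠ "" ∧ pair0 l = "Port-Version" then pair1 l else st.2.2.1) ∧
    (stepA st l).2.2.2 = (if l ≠ "" ∧ pair0 l = "Architecture" then pair1 l else st.2.2.2) := by
  obtain ⟨p, v, pv, a⟩ := st
  by_cases hne : l = ""
  · simp [stepA, hne]
  · simp only [stepA, pair0, pair1, ne_eq, hne, not_false_eq_true, if_true, true_and]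
    split_ifs with h1 h2 h3 h4 <;> simp_all

theorem loop_inv (lines : List String) (st : String × String × String × String) :
    (lines.foldl stepA st).1 = lastValue lines.reverse "Package" st.1 ∧
    (lines.foldl stepA st).2.1 = lastValue lines.reverse "Version" st.2.1 ∧
    (lines.foldl stepA st).2.2.1 = lastValue lines.reverse "Port-Version" st.2.2.1 ∧
    (lines.foldl stepA st).2.2.2 = lastValue lines.reverse "Architecture" st.2.2.2 := by
  induction lines generalizing st with
  | nil => exact ⟨rfl, rfl, rfl, rfl⟩
  | cons l rest ih =>
    obtain ⟨h1, h2, h3, h4⟩ := ih (stepA st l)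
    obtain ⟨g1, g2, g3, g4⟩ := stepA_fields st l
    refine ⟨?_, ?_, ?_, ?_⟩ <;>
      simp [List.foldl_cons, lastValue_append, lastValue, h1, h2, h3, h4, g1, g2, g3, g4]

-- ===== VERDICT (by name: the statement is the Claim_ definition above) =====
theorem read_control_spec : Claim_equal_read_control := by
  intro control _ _
  unfold Spec_read_control read_control read_control_alt
  obtain ⟨h1, h2, h3, h4⟩ := loop_inv (pySplit control "\n") ("", "0", "0", "")
  simp only
  rw [h1, h2, h3, h4]
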